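-- pv_equiv track=rewrite | github.com/onesvat/what-am-i-doing | sp-generate-tasks.py | uniquify_path
-- ===== SOURCE A (Python) =====
-- def uniquify_path(base_path: str, task_id: str, used_paths: set[str]) -> str:
--     candidate = base_path
--     if candidate in used_paths:
--         candidate = f"{base_path}-{task_id}"
--     suffix = 2
--     while candidate in used_paths:
--         candidate = f"{base_path}-{task_id}-{suffix}"
--         suffix += 1
--     used_paths.add(candidate)
--     return candidate
-- ===== SOURCE B (Python) =====
-- def uniquify_path(base_path: str, task_id: str, used_paths: set[str]) -> str:
--     if base_path not in used_paths:
--         candidate = base_path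
--     else:
--         tagged = f"{base_path}-{task_id}"
--         if tagged not in used_paths:
--             candidate = tagged
--         else:
--             prefix = f"{tagged}-"
--             # one pass over the set: strip the fixed prefix off every colliding path,
--             # then probe only the small suffix set instead of the whole path set
--             tails = {p[len(prefix):] for p in used_paths if p.startswith(prefix)}
--             n = 2
--             while str(n) in tails:
--                 n += 1
--             candidate = f"{prefix}{n}"
--     used_paths.add(candidate)
--     return candidate
-- ===== Notes on version B (the rewrite author's own statement) =====
-- stated objective: alternative
-- what changed: Instead of repeatedly building full candidate paths and probing them against the whole used_paths set, B does one pass over used_paths stripping the fixed '{base}-{task_id}-' prefix into a set of suffix strings, then searches the first free number by probing str(n) against that (typically tiny) suffix set; full paths are never constructed inside the loop.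
import Mathlib
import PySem

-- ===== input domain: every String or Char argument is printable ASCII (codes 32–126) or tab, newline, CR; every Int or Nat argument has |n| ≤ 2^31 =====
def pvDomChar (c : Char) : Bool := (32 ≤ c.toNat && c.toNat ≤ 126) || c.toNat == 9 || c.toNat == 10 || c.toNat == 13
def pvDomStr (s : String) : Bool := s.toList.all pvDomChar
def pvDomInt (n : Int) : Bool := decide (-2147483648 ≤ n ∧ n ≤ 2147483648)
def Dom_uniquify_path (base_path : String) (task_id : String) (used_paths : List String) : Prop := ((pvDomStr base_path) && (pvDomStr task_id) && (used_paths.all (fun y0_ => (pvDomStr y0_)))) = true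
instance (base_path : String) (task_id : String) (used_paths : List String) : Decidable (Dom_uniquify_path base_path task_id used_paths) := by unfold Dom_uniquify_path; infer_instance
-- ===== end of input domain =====

-- B replaces A's probe-each-full-candidate loop by one prefix-stripping pass over used_paths
-- (collecting the suffixes behind "{base}-{task_id}-" into a set) followed by a search over the
-- small suffix set (alternative algorithm, same observable result). Equivalence is about the
-- RETURN value only: Python A and B both also add the returned path to the caller's set, and
-- that mutation is identical in both.

-- ===== PORT A =====
-- the while loop, fuelled: `used_paths.length + 2` fuel always exceeds the number of iterations
-- Python performs (the numbered candidates are pairwise distinct, so at most `length + 1` tests succeed)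
def pvLoopA (base_path task_id : String) (used_paths : List String)
    : String → Int → Nat → String
  | cand, _, 0 => cand
  | cand, suffix, fuel+1 =>
    if used_paths.contains cand then
      pvLoopA base_path task_id used_paths
        (base_path ++ "-" ++ task_id ++ "-" ++ PySem.Int.toStr suffix) (suffix + 1) fuel
    else cand

def uniquify_path (base_path : String) (task_id : String) (used_paths : List String) : String :=
  let candidate := base_path
  let candidate := if used_paths.contains candidate then base_path ++ "-" ++ task_id else candidate
  pvLoopA base_path task_id used_paths candidate 2 (used_paths.length + 2)

-- ===== PORT B =====
-- Source B's set comprehension: the suffixes of the used paths that extend `prefix`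
def pvTails (pfx : String) (used_paths : List String) : PySem.Set String :=
  PySem.Set.ofList
    ((used_paths.filter (fun p => PySem.Str.startswith p pfx)).map
      (fun p => PySem.Str.slice p (some (PySem.Str.len pfx)) none))

-- Source B's `while str(n) in tails: n += 1`, fuelled: `used_paths.length + 1` fuel always exceeds
-- the number of iterations Python performs (each successful probe hits a distinct tail)
def pvMexB (tails : List String) : Int → Nat → Int
  | n, 0 => n
  | n, fuel+1 =>
    if tails.contains (PySem.Int.toStr n) then pvMexB tails (n + 1) fuel else n

def uniquify_path_alt (base_path : String) (task_id : String) (used_paths : List String) : String :=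
  if used_paths.contains base_path then
    let tagged := base_path ++ "-" ++ task_id
    if used_paths.contains tagged then
      let pfx := tagged ++ "-"
      let tails := pvTails pfx used_paths
      pfx ++ PySem.Int.toStr (pvMexB tails 2 (used_paths.length + 1))
    else tagged
  else base_path

-- ===== PRECONDITION & SPEC =====
def Spec_uniquify_path (base_path : String) (task_id : String) (used_paths : List String) (out : String) : Prop := out = uniquify_path_alt base_path task_id used_paths
instance (base_path : String) (task_id : String) (used_paths : List String) (out : String) : Decidable (Spec_uniquify_path base_path task_id used_paths out) := by unfold Spec_uniquify_path; infer_instance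

-- ===== CLAIM (what is proved, stated in full; the proofs are below) =====
def Claim_equal_uniquify_path : Prop := ∀ (base_path : String) (task_id : String) (used_paths : List String), Dom_uniquify_path base_path task_id used_paths → Spec_uniquify_path base_path task_id used_paths (uniquify_path base_path task_id used_paths)

-- ===== LEMMAS AND PROOFS =====

-- stripping: p starts with pfx and strips to t  ↔  p is literally pfx ++ t
theorem pvStrip_iff (pfx t p : String) :
    (PySem.Str.startswith p pfx = true ∧
      PySem.Str.slice p (some (PySem.Str.len pfx)) none = t) ↔ p = pfx ++ t := by
  constructor
  · rintro ⟨hsw, hsl⟩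
    rw [PySem.Str.startswith_eq, PySem.Chars.startswith_iff] at hsw
    obtain ⟨q, hq⟩ := hsw
    apply String.toList_inj.mp
    have hsl' : (PySem.Str.slice p (some (PySem.Str.len pfx)) none).toList = t.toList := by
      rw [hsl]
    rw [PySem.Str.toList_slice, PySem.Chars.slice_eq_listSlice, PySem.Str.len_eq,
      PySem.List.slice_from_natCast, ← hq, List.drop_left] at hsl'
    rw [String.toList_append, ← hq, hsl']
  · rintro rfl
    constructor
    · rw [PySem.Str.startswith_eq, PySem.Chars.startswith_iff, String.toList_append]
      exact List.prefix_append _ _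
    · apply String.toList_inj.mp
      rw [PySem.Str.toList_slice, PySem.Chars.slice_eq_listSlice, PySem.Str.len_eq,
        PySem.List.slice_from_natCast, String.toList_append, List.drop_left]

-- the probe: a full path pfx ++ t is used  ↔  the stripped tail t is in B's suffix set
theorem pvProbe (pfx t : String) (used_paths : List String) :
    pfx ++ t ∈ used_paths ↔ t ∈ pvTails pfx used_paths := by
  unfold pvTails
  rw [PySem.Set.mem_ofList]
  simp only [List.mem_map, List.mem_filter]
  constructor
  · intro h
    exact ⟨pfx ++ t, ⟨h, ((pvStrip_iff pfx t _).mpr rfl).1⟩, ((pvStrip_iff pfx t _).mpr rfl).2⟩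
  · rintro ⟨p, ⟨hp, hsw⟩, hsl⟩
    rwa [← (pvStrip_iff pfx t p).mp ⟨hsw, hsl⟩]

-- A's while loop, in the state it has once suffix numbering has begun, is pfx ++ B's mex search
theorem pvLoop_eq_mex (base_path task_id : String) (used_paths : List String) :
    ∀ (fuel : Nat) (n : Int),
      pvLoopA base_path task_id used_paths
          (base_path ++ "-" ++ task_id ++ "-" ++ PySem.Int.toStr n) (n + 1) fuel
        = base_path ++ "-" ++ task_id ++ "-" ++
            PySem.Int.toStr (pvMexB (pvTails (base_path ++ "-" ++ task_id ++ "-") used_paths) n fuel) := by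
  intro fuel
  induction fuel with
  | zero => intro n; rfl
  | succ fuel ih =>
    intro n
    simp only [pvLoopA, pvMexB, List.contains_iff_mem]
    simp only [pvProbe (base_path ++ "-" ++ task_id ++ "-") (PySem.Int.toStr n) used_paths]
    split_ifs with h
    · exact ih (n + 1)
    · rfl

-- ===== VERDICT (by name: the statement is the Claim_ definition above) =====
theorem uniquify_path_spec : Claim_equal_uniquify_path := by
  intro base_path task_id used_paths _
  unfold Spec_uniquify_path uniquify_path uniquify_path_alt
  by_cases h0 : used_paths.contains base_path = true
  · simp only [h0, if_true]
    by_cases h1 : used_paths.contains (base_path ++ "-" ++ task_id) = true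
    · show pvLoopA base_path task_id used_paths (base_path ++ "-" ++ task_id) 2 (used_paths.length + 2) = _
      rw [show used_paths.length + 2 = (used_paths.length + 1) + 1 from rfl]
      simp only [pvLoopA, h1, if_true]
      exact pvLoop_eq_mex base_path task_id used_paths (used_paths.length + 1) 2
    · have h1' : base_path ++ "-" ++ task_id ∉ used_paths := by simpa using h1
      show pvLoopA base_path task_id used_paths (base_path ++ "-" ++ task_id) 2 (used_paths.length + 2) = _
      rw [show used_paths.length + 2 = (used_paths.length + 1) + 1 from rfl]
      simp [pvLoopA, h1']
  · have h0' : base_path ∉ used_paths := by simpa using h0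
    simp only [Bool.not_eq_true] at h0
    simp only [h0, Bool.false_eq_true, if_false]
    show pvLoopA base_path task_id used_paths base_path 2 (used_paths.length + 2) = base_path
    rw [show used_paths.length + 2 = (used_paths.length + 1) + 1 from rfl]
    simp [pvLoopA, h0']
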